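-- pv_equiv track=rewrite | github.com/Kamuie99/TIL | 03.SWEA/SelfStudy/0213.코로나감염/sol.py | corona
-- ===== SOURCE A (Python) =====
-- from collections import deque
--
-- def corona(N, classroom):
--     # 방문 여부를 저장하기 위한 2차원 배열
--     visited = [[False] * N for _ in range(N)]
--
--     # 초기 감염자의 좌표를 찾아 큐에 추가
--     field = []
--     for i in range(N):
--         for j in range(N):
--             if classroom[i][j] == 1:
--                 field.append((i, j))
--                 visited[i][j] = True
--
--     # 상하좌우 이동 방향
--     directions = [(1, 0), (-1, 0), (0, 1), (0, -1)]
--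
--     # 감염자들의 위치를 저장하는 큐
--     queue = deque(field)
--
--     days = 0
--     while queue:
--         # 현재 큐에 있는 모든 감염자에 대해 진행
--         for _ in range(len(queue)):
--             x, y = queue.popleft()
--
--             # 상하좌우로 이동하여 감염시키기
--             for dx, dy in directions:
--                 nx, ny = x + dx, y + dy
--                 if 0 <= nx < N and 0 <= ny < N and not visited[nx][ny]:
--                     # 4차 백신을 맞은 경우 감염되지 않음
--                     if classroom[nx][ny] != 4:
--                         visited[nx][ny] = True
--                         queue.append((nx, ny))
--
--         # 하루가 지남
--         days += 1
--
--     return days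
-- ===== SOURCE B (Python) =====
-- def corona(N, classroom):
--     # Synchronous cellular-automaton sweeps: no queue, no visited bookkeeping.
--     # Each day recompute the whole infection grid from the previous one until
--     # it stops changing; the BFS day count equals 1 + number of changing sweeps.
--     infected = [[classroom[i][j] == 1 for j in range(N)] for i in range(N)]
--     if not any(cell for row in infected for cell in row):
--         return 0
--     days = 1
--     while True:
--         new = [[infected[i][j] or (classroom[i][j] != 4 and (
--                     (i > 0 and infected[i - 1][j]) or
--                     (i < N - 1 and infected[i + 1][j]) or
--                     (j > 0 and infected[i][j - 1]) or
--                     (j < N - 1 and infected[i][j + 1])))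
--                 for j in range(N)] for i in range(N)]
--         if new == infected:
--             return days
--         infected = new
--         days += 1
-- ===== Notes on version B (the rewrite author's own statement) =====
-- stated objective: alternative
-- what changed: Replaces A's multi-source BFS (deque + visited array, counting level sweeps) by a synchronous cellular-automaton fixpoint iteration: each day the whole infection grid is recomputed from the previous one (a cell becomes infected iff it was infected or is non-4 with an infected orthogonal neighbour) until the grid stops changing; the answer is 1 + the number of changing sweeps, or 0 with no initial seeds.
import Mathlib
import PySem

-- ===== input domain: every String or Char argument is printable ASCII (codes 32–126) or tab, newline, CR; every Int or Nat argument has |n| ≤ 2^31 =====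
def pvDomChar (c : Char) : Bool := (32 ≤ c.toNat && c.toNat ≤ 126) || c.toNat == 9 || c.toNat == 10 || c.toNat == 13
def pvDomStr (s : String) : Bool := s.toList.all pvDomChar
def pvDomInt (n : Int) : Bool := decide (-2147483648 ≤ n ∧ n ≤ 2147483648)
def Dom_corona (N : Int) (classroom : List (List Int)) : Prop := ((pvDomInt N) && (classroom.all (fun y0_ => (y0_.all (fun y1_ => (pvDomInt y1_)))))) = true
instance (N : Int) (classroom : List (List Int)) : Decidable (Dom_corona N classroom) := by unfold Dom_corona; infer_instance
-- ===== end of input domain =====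

-- B replaces A's multi-source BFS (deque + visited array, counting level sweeps) by a synchronous
-- cellular-automaton fixpoint iteration: each day the whole grid is recomputed from the previous one
-- until it stops changing; the answer is 1 + the number of changing sweeps (0 with no seeds).
-- Equivalence is about the RETURN value only (neither Python mutates its arguments).

-- unvisG: number of false cells; proof-side measure used only for termination of both ports.
def unvisG (V : List (List Bool)) : Nat := (V.map (fun r => r.count false)).sum

-- ===== PORT A =====
-- classroom[i][j] (total read; Pre_corona guarantees the indices are in range where Python succeeds)
def cellA (classroom : List (List Int)) (i j : Int) : Int :=
  (PySem.List.pyGet? ((PySem.List.pyGet? classroom i).getD []) j).getD 0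
-- visited[i][j] (in range whenever read, by the 0 ≤ nx < N guards)
def vGetA (V : List (List Bool)) (i j : Int) : Bool :=
  (PySem.List.pyGet? ((PySem.List.pyGet? V i).getD []) j).getD true
-- row[j] = True
def setRowA : List Bool → Nat → List Bool
  | [], _ => []
  | _ :: t, 0 => true :: t
  | b :: t, n + 1 => b :: setRowA t n
-- visited[i][j] = True
def vSetA : List (List Bool) → Nat → Nat → List (List Bool)
  | [], _, _ => []
  | r :: t, 0, j => setRowA r j :: t
  | r :: t, i + 1, j => r :: vSetA t i j

def dirsA : List (Int × Int) := [(1, 0), (-1, 0), (0, 1), (0, -1)]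

-- the inner 'for dx, dy in directions' body of A (state: visited grid, cells appended to the queue)
def stepA (N : Int) (cls : List (List Int)) (x y : Int)
    (st : List (List Bool) × List (Int × Int)) : List (List Bool) × List (Int × Int) :=
  dirsA.foldl (fun st dd =>
    let nx := x + dd.1
    let ny := y + dd.2
    if 0 ≤ nx ∧ nx < N ∧ 0 ≤ ny ∧ ny < N ∧ vGetA st.1 nx ny = false then
      if cellA cls nx ny ≠ 4 then (vSetA st.1 nx.toNat ny.toNat, st.2 ++ [(nx, ny)])
      else st
    else st) st

-- 'for _ in range(len(queue))': the day's sweep pops exactly the cells present at day start,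
-- appending the newly infected ones behind them; sweepA returns (appended cells, visited).
def sweepA (N : Int) (cls : List (List Int)) :
    List (Int × Int) → List (List Bool) → List (Int × Int) × List (List Bool)
  | [], V => ([], V)
  | (x, y) :: rest, V =>
    let s := stepA N cls x y (V, [])
    let r := sweepA N cls rest s.1
    (s.2 ++ r.1, r.2)

-- measure lemmas cited by the termination proofs below
theorem setRowA_count (r : List Bool) (n : Nat) (h : r[n]? = some false) :
    (setRowA r n).count false + 1 = r.count false := by
  induction r generalizing n with
  | nil => simp at h
  | cons b t ih =>
    cases n with
    | zero => simp_all [setRowA]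
    | succ m =>
      simp only [List.getElem?_cons_succ] at h
      simp [setRowA, List.count_cons, ← ih m h]
      omega

theorem vSetA_unvis (V : List (List Bool)) (i j : Nat) (r : List Bool)
    (hi : V[i]? = some r) (hj : r[j]? = some false) :
    unvisG (vSetA V i j) + 1 = unvisG V := by
  induction V generalizing i with
  | nil => simp at hi
  | cons row t ih =>
    cases i with
    | zero =>
      simp only [List.getElem?_cons_zero, Option.some.injEq] at hi
      subst hi
      have := setRowA_count row j hj
      simp [vSetA, unvisG]
      omega
    | succ m =>
      simp only [List.getElem?_cons_succ] at hi
      have := ih m hi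
      simp [vSetA, unvisG] at this ⊢
      omega

theorem vGetA_false (V : List (List Bool)) (i j : Int) (hi : 0 ≤ i) (hj : 0 ≤ j)
    (h : vGetA V i j = false) :
    ∃ r, V[i.toNat]? = some r ∧ r[j.toNat]? = some false := by
  unfold vGetA at h
  rw [PySem.List.pyGet?_of_nonneg _ hi] at h
  cases hr : V[i.toNat]? with
  | none => rw [hr] at h; simp [PySem.List.pyGet?] at h
  | some r =>
    rw [hr] at h
    simp only [Option.getD_some] at h
    rw [PySem.List.pyGet?_of_nonneg _ hj] at h
    cases hb : r[j.toNat]? with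
    | none => rw [hb] at h; simp at h
    | some b => rw [hb] at h; simp at h; subst h; exact ⟨r, rfl, hb⟩

theorem fold_measure_generic {γ δ : Type}
    (f : (List (List Bool) × List δ) → γ → (List (List Bool) × List δ))
    (hf : ∀ st c, unvisG (f st c).1 + (f st c).2.length ≤ unvisG st.1 + st.2.length) :
    ∀ (ds : List γ) (st : List (List Bool) × List δ),
    unvisG (ds.foldl f st).1 + (ds.foldl f st).2.length ≤ unvisG st.1 + st.2.length := by
  intro ds
  induction ds with
  | nil => intro st; simp
  | cons c t ih => intro st; exact le_trans (ih (f st c)) (hf st c)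

theorem stepA_measure (N : Int) (cls : List (List Int)) (x y : Int)
    (st : List (List Bool) × List (Int × Int)) :
    unvisG (stepA N cls x y st).1 + (stepA N cls x y st).2.length ≤ unvisG st.1 + st.2.length := by
  refine fold_measure_generic _ ?_ dirsA st
  intro st dd
  dsimp only
  split
  · rename_i hc
    split
    · obtain ⟨r, hr, hb⟩ := vGetA_false st.1 _ _ hc.1 hc.2.2.1 hc.2.2.2.2
      have := vSetA_unvis st.1 _ _ r hr hb
      simp
      omega
    · exact le_refl _
  · exact le_refl _

theorem sweepA_measure (N : Int) (cls : List (List Int)) :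
    ∀ (Q : List (Int × Int)) (V : List (List Bool)),
    (sweepA N cls Q V).1.length + unvisG (sweepA N cls Q V).2 ≤ unvisG V := by
  intro Q
  induction Q with
  | nil => intro V; simp [sweepA]
  | cons c rest ih =>
    intro V
    obtain ⟨x, y⟩ := c
    simp only [sweepA]
    have h1 := stepA_measure N cls x y (V, [])
    have h2 := ih (stepA N cls x y (V, [])).1
    simp only [List.length_nil, Nat.add_zero] at h1
    simp only [List.length_append]
    omega

-- 'while queue: … days += 1'
def loopA (N : Int) (cls : List (List Int)) (q : List (Int × Int)) (V : List (List Bool))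
    (days : Int) : Int :=
  if h : q = [] then days
  else
    let s := sweepA N cls q V
    loopA N cls s.1 s.2 (days + 1)
termination_by q.length + unvisG V
decreasing_by
  have hm := sweepA_measure N cls q V
  have hq : 0 < q.length := List.length_pos_iff.mpr h
  omega

def corona (N : Int) (classroom : List (List Int)) : Int :=
  let V0 : List (List Bool) := List.replicate N.toNat (List.replicate N.toNat false)
  -- the seeding double loop: collect initially infected cells, mark them visited
  let init := (PySem.List.pyRange 0 N 1).foldl (fun st i =>
      (PySem.List.pyRange 0 N 1).foldl (fun st j =>
        if cellA classroom i j = 1 then (st.1 ++ [(i, j)], vSetA st.2 i.toNat j.toNat) else st)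
        st)
    (([] : List (Int × Int)), V0)
  loopA N classroom init.1 init.2 0

-- ===== PORT B =====
def cellB (classroom : List (List Int)) (i j : Int) : Int :=
  (PySem.List.pyGet? ((PySem.List.pyGet? classroom i).getD []) j).getD 0
-- infected[i][j]; every read B performs is in range (the grid is N×N and neighbours are guarded)
def igetB (I : List (List Bool)) (i j : Int) : Bool :=
  (PySem.List.pyGet? ((PySem.List.pyGet? I i).getD []) j).getD false

-- shape invariant carried by B's loop (proof parameter, for termination only)
def ShapeB (N : Int) (I : List (List Bool)) : Prop :=
  I.length = N.toNat ∧ ∀ r ∈ I, r.length = N.toNat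

-- one cell of the comprehension 'infected[i][j] or (classroom[i][j] != 4 and (… neighbours …))'
def caCell (N : Int) (cls : List (List Int)) (I : List (List Bool)) (i j : Int) : Bool :=
  igetB I i j || (!(cellB cls i j == 4) &&
    ((decide (0 < i) && igetB I (i - 1) j) ||
     (decide (i < N - 1) && igetB I (i + 1) j) ||
     (decide (0 < j) && igetB I i (j - 1)) ||
     (decide (j < N - 1) && igetB I i (j + 1))))

-- one synchronous day: the 'new = [[ … ]]' comprehension
def stepCA (N : Int) (cls : List (List Int)) (I : List (List Bool)) : List (List Bool) :=
  (PySem.List.pyRange 0 N 1).map (fun i =>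
    (PySem.List.pyRange 0 N 1).map (fun j => caCell N cls I i j))

theorem shape_stepCA (N : Int) (cls : List (List Int)) (I : List (List Bool)) :
    ShapeB N (stepCA N cls I) := by
  constructor
  · simp [stepCA, PySem.List.length_pyRange_one]
  · intro r hr
    simp only [stepCA, List.mem_map] at hr
    obtain ⟨i, _, rfl⟩ := hr
    simp [PySem.List.length_pyRange_one]

-- pointwise-monotone grids have no more unvisited cells; strict if unequal (termination of loopB)
theorem count_le_rel : ∀ {r r' : List Bool},
    List.Forall₂ (fun a b => a = true → b = true) r r' → r'.count false ≤ r.count false := by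
  intro r r' h
  induction h with
  | nil => simp
  | @cons a b t t' hab htail ih =>
    cases a
    · cases b <;> (rw [List.count_cons, List.count_cons]; norm_num; omega)
    · have hb : b = true := hab rfl
      subst hb
      rw [List.count_cons, List.count_cons]
      norm_num
      omega

theorem count_lt_rel : ∀ {r r' : List Bool},
    List.Forall₂ (fun a b => a = true → b = true) r r' → r ≠ r' →
    r'.count false < r.count false := by
  intro r r' h
  induction h with
  | nil => intro hne; exact absurd rfl hne
  | @cons a b t t' hab htail ih =>
    intro hne
    by_cases hab' : a = b
    · subst hab'
      have ht : t ≠ t' := fun he => hne (by rw [he])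
      have := ih ht
      cases a <;> (rw [List.count_cons, List.count_cons]; norm_num; omega)
    · have ha : a = false := by
        cases a
        · rfl
        · exact absurd (hab rfl).symm hab'
      subst ha
      have hb : b = true := by
        cases b
        · exact absurd rfl hab'
        · rfl
      subst hb
      have := count_le_rel htail
      rw [List.count_cons, List.count_cons]
      norm_num
      omega

theorem unvis_le_rel : ∀ {G G' : List (List Bool)},
    List.Forall₂ (List.Forall₂ (fun a b => a = true → b = true)) G G' →
    unvisG G' ≤ unvisG G := by
  intro G G' h
  induction h with
  | nil => simp
  | @cons r r' t t' hab htail ih =>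
    have := count_le_rel hab
    simp only [unvisG, List.map_cons, List.sum_cons] at ih ⊢
    omega

theorem unvis_lt_rel : ∀ {G G' : List (List Bool)},
    List.Forall₂ (List.Forall₂ (fun a b => a = true → b = true)) G G' → G ≠ G' →
    unvisG G' < unvisG G := by
  intro G G' h
  induction h with
  | nil => intro hne; exact absurd rfl hne
  | @cons r r' t t' hab htail ih =>
    intro hne
    by_cases hr : r = r'
    · subst hr
      have ht : t ≠ t' := fun he => hne (by rw [he])
      have := ih ht
      simp only [unvisG, List.map_cons, List.sum_cons] at this ⊢
      omega
    · have h1 := count_lt_rel hab hr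
      have h2 := unvis_le_rel htail
      simp only [unvisG, List.map_cons, List.sum_cons] at h2 ⊢
      omega

theorem igetB_elem (I : List (List Bool)) (i j : Nat) (hi : i < I.length)
    (hj : j < I[i].length) : igetB I (i : Int) (j : Int) = I[i][j] := by
  unfold igetB
  simp only [PySem.List.pyGet?_natCast]
  rw [List.getElem?_eq_getElem hi]
  simp only [Option.getD_some]
  rw [List.getElem?_eq_getElem hj]
  rfl

theorem pyRange_cast (N : Int) :
    PySem.List.pyRange 0 N 1 = (List.range N.toNat).map (fun k : Nat => (k : Int)) := by
  rw [PySem.List.pyRange_one]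
  simp only [sub_zero, zero_add]

theorem stepCA_row (N : Int) (cls : List (List Int)) (I : List (List Bool)) (i : Nat)
    (hi : i < N.toNat) :
    (stepCA N cls I)[i]? = some ((List.range N.toNat).map (fun j : Nat => caCell N cls I (i : Int) (j : Int))) := by
  unfold stepCA
  rw [pyRange_cast]
  simp only [List.map_map]
  rw [List.getElem?_map, List.getElem?_range hi]
  simp only [Option.map_some, Function.comp_apply]
  rfl

theorem rel_stepCA (N : Int) (cls : List (List Int)) (I : List (List Bool))
    (hI : ShapeB N I) :
    List.Forall₂ (List.Forall₂ (fun a b => a = true → b = true)) I (stepCA N cls I) := by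
  rw [List.forall₂_iff_get]
  obtain ⟨hlen, hrow⟩ := hI
  have hslen : (stepCA N cls I).length = N.toNat := (shape_stepCA N cls I).1
  refine ⟨by rw [hlen, hslen], ?_⟩
  intro i h₁ h₂
  have hi : i < N.toNat := by rw [← hlen]; exact h₁
  have hirow : (stepCA N cls I)[i]
      = (List.range N.toNat).map (fun j : Nat => caCell N cls I (i : Int) (j : Int)) := by
    have h := stepCA_row N cls I i hi
    rw [List.getElem?_eq_getElem h₂] at h
    exact Option.some.inj h
  rw [List.forall₂_iff_get]
  simp only [List.get_eq_getElem]
  rw [hirow]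
  have hrl : I[i].length = N.toNat := hrow _ (List.getElem_mem h₁)
  refine ⟨by simp [hrl], ?_⟩
  intro j hj₁ hj₂
  have hj : j < N.toNat := by rw [← hrl]; exact hj₁
  rw [List.getElem_map, List.getElem_range]
  intro hval
  unfold caCell
  rw [igetB_elem I i j h₁ hj₁, hval]
  simp

theorem stepCA_decrease (N : Int) (cls : List (List Int)) (I : List (List Bool))
    (hI : ShapeB N I) (hne : stepCA N cls I ≠ I) :
    unvisG (stepCA N cls I) < unvisG I :=
  unvis_lt_rel (rel_stepCA N cls I hI) (fun h => hne h.symm)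

-- 'while True: new = …; if new == infected: return days; infected = new; days += 1'
def loopB (N : Int) (cls : List (List Int)) (I : List (List Bool)) (hI : ShapeB N I)
    (days : Int) : Int :=
  let new := stepCA N cls I
  if h : new = I then days
  else loopB N cls new (shape_stepCA N cls I) (days + 1)
termination_by unvisG I
decreasing_by exact stepCA_decrease N cls I hI h

-- 'infected = [[classroom[i][j] == 1 …]]'
def initGrid (N : Int) (cls : List (List Int)) : List (List Bool) :=
  (PySem.List.pyRange 0 N 1).map (fun i =>
    (PySem.List.pyRange 0 N 1).map (fun j => cellB cls i j == 1))

theorem shape_init (N : Int) (cls : List (List Int)) : ShapeB N (initGrid N cls) := by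
  constructor
  · simp [initGrid, PySem.List.length_pyRange_one]
  · intro r hr
    simp only [initGrid, List.mem_map] at hr
    obtain ⟨i, _, rfl⟩ := hr
    simp [PySem.List.length_pyRange_one]

def corona_alt (N : Int) (classroom : List (List Int)) : Int :=
  let I := initGrid N classroom
  -- 'if not any(cell for row in infected for cell in row): return 0'
  if (I.any (fun r => r.any (fun c => c))) = false then 0
  else loopB N classroom I (shape_init N classroom) 1

-- ===== PRECONDITION & SPEC =====
-- Pre_ excludes exactly the inputs where the Python raises IndexError: grids with fewer than N rows,
-- or one of the first N rows shorter than N (both A and B index classroom[i][j] for all 0 ≤ i,j < N).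
def Pre_corona (N : Int) (classroom : List (List Int)) : Prop :=
  N ≤ classroom.length ∧ ∀ row ∈ classroom.take N.toNat, N ≤ row.length
instance (N : Int) (classroom : List (List Int)) : Decidable (Pre_corona N classroom) := by
  unfold Pre_corona; infer_instance

def pvWitness_corona : Int × List (List Int) := (3, [[1, 0, 0], [0, 4, 0], [0, 0, 1]])

def Spec_corona (N : Int) (classroom : List (List Int)) (out : Int) : Prop := out = corona_alt N classroom
instance (N : Int) (classroom : List (List Int)) (out : Int) : Decidable (Spec_corona N classroom out) := by unfold Spec_corona; infer_instance

-- ===== CLAIM (what is proved, stated in full; the proofs are below) =====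
def Claim_equal_corona : Prop := ∀ (N : Int) (classroom : List (List Int)), Dom_corona N classroom → Pre_corona N classroom → Spec_corona N classroom (corona N classroom)

-- ===== LEMMAS AND PROOFS =====

theorem cellB_eq : cellB = cellA := rfl

def inR (N a b : Int) : Prop := 0 ≤ a ∧ a < N ∧ 0 ≤ b ∧ b < N

def hitB (x y a b : Int) : Bool := dirsA.any (fun dd => (x + dd.1 == a) && (y + dd.2 == b))
def hitQ (Q : List (Int × Int)) (a b : Int) : Bool := Q.any (fun c => hitB c.1 c.2 a b)
def okB (N : Int) (cls : List (List Int)) (a b : Int) : Bool :=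
  decide (0 ≤ a ∧ a < N ∧ 0 ≤ b ∧ b < N) && !(cellA cls a b == 4)

theorem okB_true (N : Int) (cls : List (List Int)) (a b : Int) :
    okB N cls a b = true ↔ (inR N a b ∧ cellA cls a b ≠ 4) := by
  unfold okB inR
  simp only [Bool.and_eq_true, decide_eq_true_eq, Bool.not_eq_eq_eq_not, Bool.not_true,
    beq_eq_false_iff_ne, ne_eq]

-- proof-side name for A's neighbour-scan loop body
def fA (N : Int) (cls : List (List Int)) (x y : Int)
    (st : List (List Bool) × List (Int × Int)) (dd : Int × Int) :
    List (List Bool) × List (Int × Int) :=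
  let nx := x + dd.1
  let ny := y + dd.2
  if 0 ≤ nx ∧ nx < N ∧ 0 ≤ ny ∧ ny < N ∧ vGetA st.1 nx ny = false then
    if cellA cls nx ny ≠ 4 then (vSetA st.1 nx.toNat ny.toNat, st.2 ++ [(nx, ny)])
    else st
  else st

theorem stepA_eq_fold (N : Int) (cls : List (List Int)) (x y : Int)
    (st : List (List Bool) × List (Int × Int)) :
    stepA N cls x y st = dirsA.foldl (fA N cls x y) st := rfl

theorem setRowA_getElem? (r : List Bool) (j b : Nat) :
    (setRowA r j)[b]? = if b = j then (r[b]?).map (fun _ => true) else r[b]? := by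
  induction r generalizing j b with
  | nil => simp [setRowA]
  | cons a t ih =>
    cases j with
    | zero => cases b with
      | zero => simp [setRowA]
      | succ b' => simp [setRowA]
    | succ j' => cases b with
      | zero => simp [setRowA]
      | succ b' => simpa [setRowA] using ih j' b'

theorem vSetA_getElem? (V : List (List Bool)) (i j a : Nat) :
    (vSetA V i j)[a]? = if a = i then (V[a]?).map (fun r => setRowA r j) else V[a]? := by
  induction V generalizing i a with
  | nil => simp [vSetA]
  | cons r t ih =>
    cases i with
    | zero => cases a with
      | zero => simp [vSetA]
      | succ a' => simp [vSetA]
    | succ i' => cases a with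
      | zero => simp [vSetA]
      | succ a' => simpa [vSetA] using ih i' a'

theorem vGet_vSet_ne (V : List (List Bool)) (p q : Nat) (a b : Int) (ha : 0 ≤ a) (hb : 0 ≤ b)
    (hne : a.toNat ≠ p ∨ b.toNat ≠ q) :
    vGetA (vSetA V p q) a b = vGetA V a b := by
  unfold vGetA
  rw [PySem.List.pyGet?_of_nonneg _ ha, PySem.List.pyGet?_of_nonneg _ ha, vSetA_getElem?]
  by_cases hap : a.toNat = p
  · rw [if_pos hap]
    cases hr : V[a.toNat]? with
    | none => simp
    | some r =>
      simp only [Option.map_some, Option.getD_some]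
      rw [PySem.List.pyGet?_of_nonneg _ hb, PySem.List.pyGet?_of_nonneg _ hb, setRowA_getElem?]
      have hbq : b.toNat ≠ q := by tauto
      rw [if_neg hbq]
  · rw [if_neg hap]

theorem vGet_vSet_self (V : List (List Bool)) (a b : Int) (ha : 0 ≤ a) (hb : 0 ≤ b)
    (h : vGetA V a b = false) :
    vGetA (vSetA V a.toNat b.toNat) a b = true := by
  obtain ⟨r, hr, hb'⟩ := vGetA_false V a b ha hb h
  unfold vGetA
  rw [PySem.List.pyGet?_of_nonneg _ ha, vSetA_getElem?, if_pos rfl, hr]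
  simp only [Option.map_some, Option.getD_some]
  rw [PySem.List.pyGet?_of_nonneg _ hb, setRowA_getElem?, if_pos rfl, hb']
  rfl

-- one direction of the neighbour scan, pointwise on the visited grid
theorem fA_point (N : Int) (cls : List (List Int)) (x y : Int) (dd : Int × Int)
    (V : List (List Bool)) (acc : List (Int × Int)) (a b : Int) (ha : 0 ≤ a) (hb : 0 ≤ b) :
    vGetA (fA N cls x y (V, acc) dd).1 a b
      = (vGetA V a b || (((x + dd.1 == a) && (y + dd.2 == b)) && okB N cls a b)) := by
  unfold fA
  dsimp only
  by_cases hhit : x + dd.1 = a ∧ y + dd.2 = b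
  · obtain ⟨h1, h2⟩ := hhit
    rw [h1, h2]
    simp only [beq_self_eq_true, Bool.and_self, Bool.true_and]
    by_cases hv : vGetA V a b = true
    · rw [if_neg (by intro hg; rw [hv] at hg; exact absurd hg.2.2.2.2 (by simp)), hv]
      simp
    · have hv' : vGetA V a b = false := by revert hv; cases vGetA V a b <;> simp
      by_cases hin : 0 ≤ a ∧ a < N ∧ 0 ≤ b ∧ b < N
      · rw [if_pos ⟨hin.1, hin.2.1, hin.2.2.1, hin.2.2.2, hv'⟩]
        by_cases hc : cellA cls a b ≠ 4
        · rw [if_pos hc]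
          dsimp only
          rw [vGet_vSet_self V a b ha hb hv']
          have hok : okB N cls a b = true := (okB_true N cls a b).mpr ⟨hin, hc⟩
          rw [hok, hv']
          simp
        · rw [if_neg hc]
          have hok : okB N cls a b = false := by
            cases hk : okB N cls a b
            · rfl
            · exact absurd ((okB_true N cls a b).mp hk).2 hc
          rw [hok, hv']
          simp
      · rw [if_neg (by intro hg; exact hin ⟨hg.1, hg.2.1, hg.2.2.1, hg.2.2.2.1⟩)]
        have hok : okB N cls a b = false := by
          cases hk : okB N cls a b
          · rfl
          · exact absurd ((okB_true N cls a b).mp hk).1 hin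
        rw [hok, hv']
        simp
  · have hbit : ((x + dd.1 == a) && (y + dd.2 == b)) = false := by
      cases h : ((x + dd.1 == a) && (y + dd.2 == b))
      · rfl
      · exfalso
        rw [Bool.and_eq_true, beq_iff_eq, beq_iff_eq] at h
        exact hhit h
    rw [hbit]
    simp only [Bool.false_and, Bool.or_false]
    split
    · rename_i hg
      split
      · dsimp only
        apply vGet_vSet_ne _ _ _ _ _ ha hb
        rcases not_and_or.mp hhit with h | h
        · left; omega
        · right; omega
      · rfl
    · rfl

theorem fA_acc_sub (N : Int) (cls : List (List Int)) (x y : Int)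
    (st : List (List Bool) × List (Int × Int)) (dd : Int × Int) (c : Int × Int)
    (hc : c ∈ st.2) : c ∈ (fA N cls x y st dd).2 := by
  unfold fA
  dsimp only
  split
  · split
    · simp [hc]
    · exact hc
  · exact hc

theorem fA_mem (N : Int) (cls : List (List Int)) (x y : Int) (dd : Int × Int)
    (V : List (List Bool)) (acc : List (Int × Int)) (a b : Int) (ha : 0 ≤ a) (hb : 0 ≤ b)
    (h0 : vGetA V a b = false) (h1 : vGetA (fA N cls x y (V, acc) dd).1 a b = true) :
    (a, b) ∈ (fA N cls x y (V, acc) dd).2 := by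
  have hp := fA_point N cls x y dd V acc a b ha hb
  rw [h1, h0] at hp
  simp only [Bool.false_or] at hp
  have hp' := hp.symm
  rw [Bool.and_eq_true, Bool.and_eq_true, beq_iff_eq, beq_iff_eq] at hp'
  obtain ⟨⟨hxa, hyb⟩, hok⟩ := hp'
  obtain ⟨hinr, hc4⟩ := (okB_true N cls a b).mp hok
  unfold fA
  dsimp only
  rw [hxa, hyb]
  rw [if_pos ⟨ha, hinr.2.1, hb, hinr.2.2.2, h0⟩, if_pos hc4]
  simp

theorem fold_point (N : Int) (cls : List (List Int)) (x y : Int) :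
    ∀ (ds : List (Int × Int)) (V : List (List Bool)) (acc : List (Int × Int)) (a b : Int),
    0 ≤ a → 0 ≤ b →
    vGetA (ds.foldl (fA N cls x y) (V, acc)).1 a b
      = (vGetA V a b ||
          (ds.any (fun dd => (x + dd.1 == a) && (y + dd.2 == b)) && okB N cls a b)) := by
  intro ds
  induction ds with
  | nil => intro V acc a b _ _; simp
  | cons dd t ih =>
    intro V acc a b ha hb
    simp only [List.foldl_cons, List.any_cons]
    have hfa : (fA N cls x y (V, acc) dd) = ((fA N cls x y (V, acc) dd).1, (fA N cls x y (V, acc) dd).2) := rfl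
    rw [hfa, ih _ _ a b ha hb, fA_point N cls x y dd V acc a b ha hb]
    cases vGetA V a b <;> cases okB N cls a b <;>
      cases hd : ((x + dd.1 == a) && (y + dd.2 == b)) <;> simp

theorem fold_acc_mem (N : Int) (cls : List (List Int)) (x y : Int) :
    ∀ (ds : List (Int × Int)) (st : List (List Bool) × List (Int × Int)) (c : Int × Int),
    c ∈ st.2 → c ∈ (ds.foldl (fA N cls x y) st).2 := by
  intro ds
  induction ds with
  | nil => intro st c hc; exact hc
  | cons dd t ih =>
    intro st c hc
    exact ih _ _ (fA_acc_sub N cls x y st dd c hc)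

theorem fold_q (N : Int) (cls : List (List Int)) (x y : Int) :
    ∀ (ds : List (Int × Int)) (V : List (List Bool)) (acc : List (Int × Int)) (c : Int × Int),
    c ∈ (ds.foldl (fA N cls x y) (V, acc)).2 →
    c ∈ acc ∨ (inR N c.1 c.2 ∧ cellA cls c.1 c.2 ≠ 4 ∧ vGetA V c.1 c.2 = false ∧
      vGetA (ds.foldl (fA N cls x y) (V, acc)).1 c.1 c.2 = true) := by
  intro ds
  induction ds with
  | nil => intro V acc c hc; exact Or.inl hc
  | cons dd t ih =>
    intro V acc c hc
    simp only [List.foldl_cons] at hc ⊢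
    have hfa : (fA N cls x y (V, acc) dd) = ((fA N cls x y (V, acc) dd).1, (fA N cls x y (V, acc) dd).2) := rfl
    rw [hfa] at hc
    rcases ih _ _ c hc with h | ⟨hin, h4, hf, ht⟩
    · -- c is in the accumulator after one fA step
      unfold fA at h
      dsimp only at h
      by_cases hg : 0 ≤ x + dd.1 ∧ x + dd.1 < N ∧ 0 ≤ y + dd.2 ∧ y + dd.2 < N ∧
          vGetA V (x + dd.1) (y + dd.2) = false
      · rw [if_pos hg] at h
        by_cases hc4 : cellA cls (x + dd.1) (y + dd.2) ≠ 4
        · rw [if_pos hc4] at h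
          dsimp only at h
          rcases List.mem_append.mp h with h' | h'
          · exact Or.inl h'
          · right
            have hceq : c = (x + dd.1, y + dd.2) := by simpa using h'
            subst hceq
            refine ⟨⟨hg.1, hg.2.1, hg.2.2.1, hg.2.2.2.1⟩, hc4, hg.2.2.2.2, ?_⟩
            rw [fold_point N cls x y t _ _ _ _ hg.1 hg.2.2.1]
            have hset : (fA N cls x y (V, acc) dd).1
                = vSetA V (x + dd.1).toNat (y + dd.2).toNat := by
              unfold fA
              dsimp only
              rw [if_pos hg, if_pos hc4]
            rw [hfa]
            dsimp only
            rw [hset, vGet_vSet_self V _ _ hg.1 hg.2.2.1 hg.2.2.2.2]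
            simp
        · rw [if_neg hc4] at h
          exact Or.inl h
      · rw [if_neg hg] at h
        exact Or.inl h
    · -- c was marked later in the fold over t; pull the falseness back one step
      right
      have hmono := fA_point N cls x y dd V acc c.1 c.2 hin.1 hin.2.2.1
      refine ⟨hin, h4, ?_, ?_⟩
      · cases hv : vGetA V c.1 c.2
        · rfl
        · rw [hfa] at hf
          rw [hv] at hmono
          simp at hmono
          rw [hmono] at hf
          cases hf
      · rw [hfa] at ht
        exact ht

theorem fold_r (N : Int) (cls : List (List Int)) (x y : Int) :
    ∀ (ds : List (Int × Int)) (V : List (List Bool)) (acc : List (Int × Int)) (a b : Int),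
    0 ≤ a → 0 ≤ b → vGetA V a b = false →
    vGetA (ds.foldl (fA N cls x y) (V, acc)).1 a b = true →
    (a, b) ∈ (ds.foldl (fA N cls x y) (V, acc)).2 := by
  intro ds
  induction ds with
  | nil =>
    intro V acc a b _ _ h0 h1
    simp only [List.foldl_nil] at h1
    rw [h0] at h1
    cases h1
  | cons dd t ih =>
    intro V acc a b ha hb h0 h1
    simp only [List.foldl_cons] at h1 ⊢
    have hfa : (fA N cls x y (V, acc) dd) = ((fA N cls x y (V, acc) dd).1, (fA N cls x y (V, acc) dd).2) := rfl
    rw [hfa] at h1 ⊢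
    by_cases hmid : vGetA (fA N cls x y (V, acc) dd).1 a b = true
    · have hmem := fA_mem N cls x y dd V acc a b ha hb h0 hmid
      exact fold_acc_mem N cls x y t _ _ hmem
    · have hmid' : vGetA (fA N cls x y (V, acc) dd).1 a b = false := by
        revert hmid; cases vGetA (fA N cls x y (V, acc) dd).1 a b <;> simp
      exact ih _ _ a b ha hb hmid' h1

-- sweep-level characterisations
theorem sweep_point (N : Int) (cls : List (List Int)) :
    ∀ (Q : List (Int × Int)) (V : List (List Bool)) (a b : Int), 0 ≤ a → 0 ≤ b →
    vGetA (sweepA N cls Q V).2 a b = (vGetA V a b || (hitQ Q a b && okB N cls a b)) := by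
  intro Q
  induction Q with
  | nil => intro V a b _ _; simp [sweepA, hitQ]
  | cons c rest ih =>
    intro V a b ha hb
    obtain ⟨x, y⟩ := c
    simp only [sweepA]
    rw [ih _ a b ha hb]
    rw [stepA_eq_fold, fold_point N cls x y dirsA V [] a b ha hb]
    simp only [hitQ, List.any_cons, hitB]
    cases vGetA V a b <;> cases okB N cls a b <;>
      cases h1 : (dirsA.any (fun dd => (x + dd.1 == a) && (y + dd.2 == b))) <;>
      cases h2 : (rest.any (fun c => hitB c.1 c.2 a b)) <;> simp_all [hitB]

theorem sweep_mono (N : Int) (cls : List (List Int)) (Q : List (Int × Int))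
    (V : List (List Bool)) (a b : Int) (ha : 0 ≤ a) (hb : 0 ≤ b)
    (h : vGetA V a b = true) : vGetA (sweepA N cls Q V).2 a b = true := by
  rw [sweep_point N cls Q V a b ha hb, h]
  simp

theorem sweep_q1 (N : Int) (cls : List (List Int)) :
    ∀ (Q : List (Int × Int)) (V : List (List Bool)) (c : Int × Int),
    c ∈ (sweepA N cls Q V).1 →
    inR N c.1 c.2 ∧ cellA cls c.1 c.2 ≠ 4 ∧ vGetA V c.1 c.2 = false ∧
      vGetA (sweepA N cls Q V).2 c.1 c.2 = true := by
  intro Q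
  induction Q with
  | nil => intro V c hc; simp [sweepA] at hc
  | cons p rest ih =>
    intro V c hc
    obtain ⟨x, y⟩ := p
    simp only [sweepA] at hc ⊢
    rcases List.mem_append.mp hc with h | h
    · rw [stepA_eq_fold] at h
      rcases fold_q N cls x y dirsA V [] c h with h' | ⟨hin, h4, hf, ht⟩
      · simp at h'
      · rw [← stepA_eq_fold] at ht
        exact ⟨hin, h4, hf, sweep_mono N cls rest _ c.1 c.2 hin.1 hin.2.2.1 ht⟩
    · obtain ⟨hin, h4, hf, ht⟩ := ih _ c h
      refine ⟨hin, h4, ?_, ht⟩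
      cases hv : vGetA V c.1 c.2
      · rfl
      · exfalso
        have := fold_point N cls x y dirsA V [] c.1 c.2 hin.1 hin.2.2.1
        rw [← stepA_eq_fold, hv] at this
        simp at this
        rw [this] at hf
        cases hf

theorem sweep_r (N : Int) (cls : List (List Int)) :
    ∀ (Q : List (Int × Int)) (V : List (List Bool)) (a b : Int), 0 ≤ a → 0 ≤ b →
    vGetA V a b = false → vGetA (sweepA N cls Q V).2 a b = true →
    (a, b) ∈ (sweepA N cls Q V).1 := by
  intro Q
  induction Q with
  | nil =>
    intro V a b _ _ h0 h1
    simp only [sweepA] at h1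
    rw [h0] at h1
    cases h1
  | cons p rest ih =>
    intro V a b ha hb h0 h1
    obtain ⟨x, y⟩ := p
    simp only [sweepA] at h1 ⊢
    by_cases hmid : vGetA (stepA N cls x y (V, [])).1 a b = true
    · rw [stepA_eq_fold] at hmid ⊢
      exact List.mem_append.mpr (Or.inl (fold_r N cls x y dirsA V [] a b ha hb h0 hmid))
    · have hmid' : vGetA (stepA N cls x y (V, [])).1 a b = false := by
        revert hmid; cases vGetA (stepA N cls x y (V, [])).1 a b <;> simp
      exact List.mem_append.mpr (Or.inr (ih _ a b ha hb hmid' h1))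

-- shape preservation along A's sweep
theorem setRowA_length (r : List Bool) (n : Nat) : (setRowA r n).length = r.length := by
  induction r generalizing n with
  | nil => rfl
  | cons b t ih => cases n with
    | zero => simp [setRowA]
    | succ m => simp [setRowA, ih m]

theorem vSetA_length (V : List (List Bool)) (i j : Nat) : (vSetA V i j).length = V.length := by
  induction V generalizing i with
  | nil => rfl
  | cons r t ih => cases i with
    | zero => simp [vSetA]
    | succ m => simp [vSetA, ih m]

theorem mem_vSetA (V : List (List Bool)) (i j : Nat) (r : List Bool)
    (hr : r ∈ vSetA V i j) : r ∈ V ∨ ∃ r0 ∈ V, r = setRowA r0 j := by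
  induction V generalizing i with
  | nil => simp [vSetA] at hr
  | cons r0 t ih =>
    cases i with
    | zero =>
      simp only [vSetA, List.mem_cons] at hr
      rcases hr with rfl | hr
      · exact Or.inr ⟨r0, List.mem_cons_self, rfl⟩
      · exact Or.inl (List.mem_cons_of_mem _ hr)
    | succ m =>
      simp only [vSetA, List.mem_cons] at hr
      rcases hr with rfl | hr
      · exact Or.inl List.mem_cons_self
      · rcases ih m hr with h | ⟨r1, h1, h2⟩
        · exact Or.inl (List.mem_cons_of_mem _ h)
        · exact Or.inr ⟨r1, List.mem_cons_of_mem _ h1, h2⟩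

theorem vSetA_shape (N : Int) (V : List (List Bool)) (i j : Nat) (h : ShapeB N V) :
    ShapeB N (vSetA V i j) := by
  refine ⟨by rw [vSetA_length]; exact h.1, ?_⟩
  intro r hr
  rcases mem_vSetA V i j r hr with h' | ⟨r0, h0, rfl⟩
  · exact h.2 r h'
  · rw [setRowA_length]
    exact h.2 r0 h0

theorem fold_shape (N : Int) (cls : List (List Int)) (x y : Int) :
    ∀ (ds : List (Int × Int)) (st : List (List Bool) × List (Int × Int)),
    ShapeB N st.1 → ShapeB N (ds.foldl (fA N cls x y) st).1 := by
  intro ds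
  induction ds with
  | nil => intro st h; exact h
  | cons dd t ih =>
    intro st h
    simp only [List.foldl_cons]
    apply ih
    unfold fA
    dsimp only
    split
    · split
      · exact vSetA_shape N st.1 _ _ h
      · exact h
    · exact h

theorem sweep_shape (N : Int) (cls : List (List Int)) :
    ∀ (Q : List (Int × Int)) (V : List (List Bool)), ShapeB N V →
    ShapeB N (sweepA N cls Q V).2 := by
  intro Q
  induction Q with
  | nil => intro V h; exact h
  | cons p rest ih =>
    intro V h
    obtain ⟨x, y⟩ := p
    simp only [sweepA]
    apply ih
    rw [stepA_eq_fold]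
    exact fold_shape N cls x y dirsA (V, []) h

-- getters read the actual entry of a grid
theorem vGetA_elem (G : List (List Bool)) (i j : Nat) (hi : i < G.length)
    (hj : j < G[i].length) : vGetA G (i : Int) (j : Int) = G[i][j] := by
  unfold vGetA
  simp only [PySem.List.pyGet?_natCast]
  rw [List.getElem?_eq_getElem hi]
  simp only [Option.getD_some]
  rw [List.getElem?_eq_getElem hj]
  rfl

theorem iget_eq_vget (N : Int) (I : List (List Bool)) (hI : ShapeB N I) (a b : Int)
    (h : inR N a b) : igetB I a b = vGetA I a b := by
  obtain ⟨ha, haN, hb, hbN⟩ := h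
  have hia : a.toNat < I.length := by rw [hI.1]; omega
  have hib : b.toNat < I[a.toNat].length := by rw [hI.2 _ (List.getElem_mem hia)]; omega
  have h1 := igetB_elem I a.toNat b.toNat hia hib
  have h2 := vGetA_elem I a.toNat b.toNat hia hib
  rw [Int.toNat_of_nonneg ha, Int.toNat_of_nonneg hb] at h1 h2
  rw [h1, h2]

-- two shaped grids agreeing in range are equal
theorem grid_ext (N : Int) (G G' : List (List Bool)) (hG : ShapeB N G) (hG' : ShapeB N G')
    (h : ∀ a b : Int, inR N a b → vGetA G a b = vGetA G' a b) : G = G' := by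
  apply List.ext_getElem (by rw [hG.1, hG'.1])
  intro i hi hi'
  apply List.ext_getElem
    (by rw [hG.2 _ (List.getElem_mem hi), hG'.2 _ (List.getElem_mem hi')])
  intro j hj hj'
  have e1 := vGetA_elem G i j hi hj
  have e2 := vGetA_elem G' i j hi' hj'
  rw [← e1, ← e2]
  apply h
  have hiN : i < N.toNat := by rw [← hG.1]; exact hi
  have hjN : j < N.toNat := by rw [← hG.2 _ (List.getElem_mem hi)]; exact hj
  exact ⟨by positivity, by omega, by positivity, by omega⟩

-- stepCA pointwise
theorem stepCA_point (N : Int) (cls : List (List Int)) (I : List (List Bool))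
    (a b : Int) (h : inR N a b) :
    vGetA (stepCA N cls I) a b = caCell N cls I a b := by
  obtain ⟨ha, haN, hb, hbN⟩ := h
  unfold vGetA stepCA
  rw [PySem.List.pyGet?_of_nonneg _ ha, pyRange_cast]
  simp only [List.map_map]
  have hlt : a.toNat < N.toNat := by omega
  rw [List.getElem?_map, List.getElem?_range hlt]
  simp only [Option.map_some, Function.comp_apply, Option.getD_some]
  rw [PySem.List.pyGet?_of_nonneg _ hb]
  have hltb : b.toNat < N.toNat := by omega
  rw [List.getElem?_map, List.getElem?_range hltb]
  simp only [Option.map_some, Function.comp_apply, Option.getD_some]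
  rw [Int.toNat_of_nonneg ha, Int.toNat_of_nonneg hb]

-- the loop invariant: away from the queue, the visited set is closed under infection
def InvA (N : Int) (cls : List (List Int)) (V : List (List Bool)) (Q : List (Int × Int)) : Prop :=
  ∀ x y : Int, inR N x y → vGetA V x y = true → (x, y) ∉ Q →
    ∀ dd ∈ dirsA, inR N (x + dd.1) (y + dd.2) → cellA cls (x + dd.1) (y + dd.2) ≠ 4 →
      vGetA V (x + dd.1) (y + dd.2) = true

-- under the loop invariant one A-sweep equals one CA-step
theorem level_eq (N : Int) (cls : List (List Int)) (Q : List (Int × Int))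
    (V : List (List Bool)) (hV : ShapeB N V)
    (hQin : ∀ c ∈ Q, inR N c.1 c.2) (hQV : ∀ c ∈ Q, vGetA V c.1 c.2 = true)
    (hInv : InvA N cls V Q) :
    (sweepA N cls Q V).2 = stepCA N cls V := by
  apply grid_ext N _ _ (sweep_shape N cls Q V hV) (shape_stepCA N cls V)
  intro a b hin
  obtain ⟨ha, haN, hb, hbN⟩ := hin
  rw [sweep_point N cls Q V a b ha hb, stepCA_point N cls V a b ⟨ha, haN, hb, hbN⟩]
  unfold caCell
  rw [iget_eq_vget N V hV a b ⟨ha, haN, hb, hbN⟩, cellB_eq]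
  by_cases hv : vGetA V a b = true
  · rw [hv]
    simp
  · have hv' : vGetA V a b = false := by revert hv; cases vGetA V a b <;> simp
    rw [hv']
    simp only [Bool.false_or]
    by_cases hc4 : cellA cls a b = 4
    · have h1 : okB N cls a b = false := by
        cases hk : okB N cls a b
        · rfl
        · exact absurd ((okB_true N cls a b).mp hk).2 (by simp [hc4])
      have h2 : (!(cellA cls a b == 4)) = false := by simp [hc4]
      rw [h1, h2]
      simp
    · have h1 : okB N cls a b = true := (okB_true N cls a b).mpr ⟨⟨ha, haN, hb, hbN⟩, hc4⟩
      have h2 : (!(cellA cls a b == 4)) = true := by simp [hc4]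
      rw [h1, h2]
      simp only [Bool.and_true, Bool.true_and]
      -- both sides say: some in-range true neighbour (adjacency is symmetric)
      by_cases hq : hitQ Q a b = true
      · rw [hq]
        simp only [hitQ, List.any_eq_true] at hq
        obtain ⟨c, hcQ, hhit⟩ := hq
        simp only [hitB, List.any_eq_true] at hhit
        obtain ⟨dd, hdd, hmat⟩ := hhit
        rw [Bool.and_eq_true, beq_iff_eq, beq_iff_eq] at hmat
        obtain ⟨hxa, hyb⟩ := hmat
        obtain ⟨hc1, hc2, hc3, hc4'⟩ := hQin c hcQ
        have hcv : igetB V c.1 c.2 = true := by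
          rw [iget_eq_vget N V hV c.1 c.2 ⟨hc1, hc2, hc3, hc4'⟩]
          exact hQV c hcQ
        symm
        simp only [Bool.or_eq_true, Bool.and_eq_true, decide_eq_true_eq]
        simp only [dirsA, List.mem_cons, List.not_mem_nil, or_false] at hdd
        rcases hdd with rfl | rfl | rfl | rfl
        · -- dd = (1,0): c = (a-1, b) is the upper neighbour
          have hxa' : c.1 + (1 : Int) = a := hxa
          have hyb' : c.2 + (0 : Int) = b := hyb
          left; left; left
          refine ⟨by omega, ?_⟩
          rw [show a - 1 = c.1 by omega, show b = c.2 by omega]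
          exact hcv
        · -- dd = (-1,0): c = (a+1, b)
          have hxa' : c.1 + (-1 : Int) = a := hxa
          have hyb' : c.2 + (0 : Int) = b := hyb
          left; left; right
          refine ⟨by omega, ?_⟩
          rw [show a + 1 = c.1 by omega, show b = c.2 by omega]
          exact hcv
        · -- dd = (0,1): c = (a, b-1)
          have hxa' : c.1 + (0 : Int) = a := hxa
          have hyb' : c.2 + (1 : Int) = b := hyb
          left; right
          refine ⟨by omega, ?_⟩
          rw [show a = c.1 by omega, show b - 1 = c.2 by omega]
          exact hcv
        · -- dd = (0,-1): c = (a, b+1)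
          have hxa' : c.1 + (0 : Int) = a := hxa
          have hyb' : c.2 + (-1 : Int) = b := hyb
          right
          refine ⟨by omega, ?_⟩
          rw [show a = c.1 by omega, show b + 1 = c.2 by omega]
          exact hcv
      · have hq' : hitQ Q a b = false := by revert hq; cases hitQ Q a b <;> simp
        rw [hq']
        symm
        -- no true neighbour at all: a true neighbour is in Q (contradicting hq') or Inv marks (a,b)
        have hnogo : ∀ u v : Int, inR N u v → vGetA V u v = true →
            ((u = a - 1 ∧ v = b) ∨ (u = a + 1 ∧ v = b) ∨
             (u = a ∧ v = b - 1) ∨ (u = a ∧ v = b + 1)) → False := by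
          intro u v huv hvt hadj
          by_cases hinq : (u, v) ∈ Q
          · have : hitQ Q a b = true := by
              simp only [hitQ, List.any_eq_true]
              refine ⟨(u, v), hinq, ?_⟩
              simp only [hitB, List.any_eq_true, dirsA, List.mem_cons, List.not_mem_nil, or_false]
              rcases hadj with ⟨hu, hw⟩ | ⟨hu, hw⟩ | ⟨hu, hw⟩ | ⟨hu, hw⟩
              · exact ⟨(1, 0), Or.inl rfl, by show ((u + 1 == a) && (v + 0 == b)) = true; rw [Bool.and_eq_true, beq_iff_eq, beq_iff_eq]; constructor <;> omega⟩
              · exact ⟨(-1, 0), Or.inr (Or.inl rfl), by show ((u + -1 == a) && (v + 0 == b)) = true; rw [Bool.and_eq_true, beq_iff_eq, beq_iff_eq]; constructor <;> omega⟩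
              · exact ⟨(0, 1), Or.inr (Or.inr (Or.inl rfl)), by show ((u + 0 == a) && (v + 1 == b)) = true; rw [Bool.and_eq_true, beq_iff_eq, beq_iff_eq]; constructor <;> omega⟩
              · exact ⟨(0, -1), Or.inr (Or.inr (Or.inr rfl)), by show ((u + 0 == a) && (v + -1 == b)) = true; rw [Bool.and_eq_true, beq_iff_eq, beq_iff_eq]; constructor <;> omega⟩
            rw [this] at hq'
            cases hq'
          · have hmark : vGetA V a b = true := by
              rcases hadj with ⟨hu, hw⟩ | ⟨hu, hw⟩ | ⟨hu, hw⟩ | ⟨hu, hw⟩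
              · have h5 : vGetA V (u + 1) (v + 0) = true := hInv u v huv hvt hinq (1, 0) (by simp [dirsA])
                  (by show inR N (u + 1) (v + 0); rw [show u + (1:Int) = a by omega, show v + (0:Int) = b by omega]; exact ⟨ha, haN, hb, hbN⟩)
                  (by show cellA cls (u + 1) (v + 0) ≠ 4; rw [show u + (1:Int) = a by omega, show v + (0:Int) = b by omega]; exact hc4)
                rw [show u + (1:Int) = a by omega, show v + (0:Int) = b by omega] at h5
                exact h5
              · have h5 : vGetA V (u + -1) (v + 0) = true := hInv u v huv hvt hinq (-1, 0) (by simp [dirsA])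
                  (by show inR N (u + -1) (v + 0); rw [show u + (-1:Int) = a by omega, show v + (0:Int) = b by omega]; exact ⟨ha, haN, hb, hbN⟩)
                  (by show cellA cls (u + -1) (v + 0) ≠ 4; rw [show u + (-1:Int) = a by omega, show v + (0:Int) = b by omega]; exact hc4)
                rw [show u + (-1:Int) = a by omega, show v + (0:Int) = b by omega] at h5
                exact h5
              · have h5 : vGetA V (u + 0) (v + 1) = true := hInv u v huv hvt hinq (0, 1) (by simp [dirsA])
                  (by show inR N (u + 0) (v + 1); rw [show u + (0:Int) = a by omega, show v + (1:Int) = b by omega]; exact ⟨ha, haN, hb, hbN⟩)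
                  (by show cellA cls (u + 0) (v + 1) ≠ 4; rw [show u + (0:Int) = a by omega, show v + (1:Int) = b by omega]; exact hc4)
                rw [show u + (0:Int) = a by omega, show v + (1:Int) = b by omega] at h5
                exact h5
              · have h5 : vGetA V (u + 0) (v + -1) = true := hInv u v huv hvt hinq (0, -1) (by simp [dirsA])
                  (by show inR N (u + 0) (v + -1); rw [show u + (0:Int) = a by omega, show v + (-1:Int) = b by omega]; exact ⟨ha, haN, hb, hbN⟩)
                  (by show cellA cls (u + 0) (v + -1) ≠ 4; rw [show u + (0:Int) = a by omega, show v + (-1:Int) = b by omega]; exact hc4)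
                rw [show u + (0:Int) = a by omega, show v + (-1:Int) = b by omega] at h5
                exact h5
            rw [hmark] at hv'
            cases hv'
        have g1 : (decide (0 < a) && igetB V (a - 1) b) = false := by
          by_cases h0 : (0:Int) < a
          · have hin1 : inR N (a - 1) b := ⟨by omega, by omega, hb, hbN⟩
            rw [iget_eq_vget N V hV _ _ hin1]
            cases hk : vGetA V (a - 1) b
            · simp
            · exact absurd (hnogo (a - 1) b hin1 hk (Or.inl ⟨rfl, rfl⟩)) (fun h => h)
          · simp [h0]
        have g2 : (decide (a < N - 1) && igetB V (a + 1) b) = false := by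
          by_cases h0 : a < N - 1
          · have hin1 : inR N (a + 1) b := ⟨by omega, by omega, hb, hbN⟩
            rw [iget_eq_vget N V hV _ _ hin1]
            cases hk : vGetA V (a + 1) b
            · simp
            · exact absurd (hnogo (a + 1) b hin1 hk (Or.inr (Or.inl ⟨rfl, rfl⟩))) (fun h => h)
          · simp [h0]
        have g3 : (decide (0 < b) && igetB V a (b - 1)) = false := by
          by_cases h0 : (0:Int) < b
          · have hin1 : inR N a (b - 1) := ⟨ha, haN, by omega, by omega⟩
            rw [iget_eq_vget N V hV _ _ hin1]
            cases hk : vGetA V a (b - 1)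
            · simp
            · exact absurd (hnogo a (b - 1) hin1 hk (Or.inr (Or.inr (Or.inl ⟨rfl, rfl⟩)))) (fun h => h)
          · simp [h0]
        have g4 : (decide (b < N - 1) && igetB V a (b + 1)) = false := by
          by_cases h0 : b < N - 1
          · have hin1 : inR N a (b + 1) := ⟨ha, haN, by omega, by omega⟩
            rw [iget_eq_vget N V hV _ _ hin1]
            cases hk : vGetA V a (b + 1)
            · simp
            · exact absurd (hnogo a (b + 1) hin1 hk (Or.inr (Or.inr (Or.inr ⟨rfl, rfl⟩)))) (fun h => h)
          · simp [h0]
        rw [g1, g2, g3, g4]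
        rfl

theorem loopA_unfold (N : Int) (cls : List (List Int)) (q : List (Int × Int))
    (V : List (List Bool)) (days : Int) :
    loopA N cls q V days = if q = [] then days
      else loopA N cls (sweepA N cls q V).1 (sweepA N cls q V).2 (days + 1) := by
  rw [loopA]
  by_cases hq : q = [] <;> simp [hq]

theorem loopB_unfold (N : Int) (cls : List (List Int)) (I : List (List Bool))
    (hI : ShapeB N I) (days : Int) :
    loopB N cls I hI days = if stepCA N cls I = I then days
      else loopB N cls (stepCA N cls I) (shape_stepCA N cls I) (days + 1) := by
  rw [loopB]
  by_cases h : stepCA N cls I = I <;> simp [h]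

-- main simulation: one BFS day = one CA sweep; A's day counter runs one behind B's
theorem loop_sim (N : Int) (cls : List (List Int)) :
    ∀ (m : Nat) (Q : List (Int × Int)) (V : List (List Bool)) (hV : ShapeB N V) (days : Int),
    Q.length + unvisG V ≤ m → Q ≠ [] →
    (∀ c ∈ Q, inR N c.1 c.2) → (∀ c ∈ Q, vGetA V c.1 c.2 = true) → InvA N cls V Q →
    loopA N cls Q V days = loopB N cls V hV (days + 1) := by
  intro m
  induction m with
  | zero =>
    intro Q V hV days hm hQ _ _ _
    exfalso
    have : 0 < Q.length := List.length_pos_iff.mpr hQ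
    omega
  | succ m ih =>
    intro Q V hV days hm hQ hQin hQV hInv
    rw [loopA_unfold, if_neg hQ]
    have hlev : (sweepA N cls Q V).2 = stepCA N cls V := level_eq N cls Q V hV hQin hQV hInv
    rw [loopB_unfold]
    by_cases hq' : (sweepA N cls Q V).1 = []
    · -- no new infection: the grid is a fixpoint
      have hfix : stepCA N cls V = V := by
        rw [← hlev]
        apply grid_ext N _ _ (sweep_shape N cls Q V hV) hV
        intro a b hin
        cases hv : vGetA V a b
        · cases hsw : vGetA (sweepA N cls Q V).2 a b
          · rfl
          · exfalso
            have := sweep_r N cls Q V a b hin.1 hin.2.2.1 hv hsw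
            rw [hq'] at this
            simp at this
        · exact sweep_mono N cls Q V a b hin.1 hin.2.2.1 hv
      rw [if_pos hfix, loopA_unfold, if_pos hq']
    · -- the grid changed: both loops advance one day
      have hshape' : ShapeB N (sweepA N cls Q V).2 := sweep_shape N cls Q V hV
      have hchanged : stepCA N cls V ≠ V := by
        intro hfix
        obtain ⟨c, hc⟩ := List.exists_mem_of_ne_nil _ hq'
        obtain ⟨hin, _, hf, ht⟩ := sweep_q1 N cls Q V c hc
        rw [hlev, hfix, hf] at ht
        cases ht
      rw [if_neg hchanged]
      have hmeas := sweepA_measure N cls Q V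
      have hQpos : 0 < Q.length := List.length_pos_iff.mpr hQ
      have hm' : (sweepA N cls Q V).1.length + unvisG (sweepA N cls Q V).2 ≤ m := by omega
      have hQ'in : ∀ c ∈ (sweepA N cls Q V).1, inR N c.1 c.2 :=
        fun c hc => (sweep_q1 N cls Q V c hc).1
      have hQ'V : ∀ c ∈ (sweepA N cls Q V).1, vGetA (sweepA N cls Q V).2 c.1 c.2 = true :=
        fun c hc => (sweep_q1 N cls Q V c hc).2.2.2
      have hInv' : InvA N cls (sweepA N cls Q V).2 (sweepA N cls Q V).1 := by
        intro x y hxy hxt hxq dd hdd hnin hn4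
        by_cases hxV : vGetA V x y = true
        · by_cases hxQ : (x, y) ∈ Q
          · -- neighbours of popped cells are marked by the sweep
            rw [sweep_point N cls Q V _ _ hnin.1 hnin.2.2.1]
            have hhit : hitQ Q (x + dd.1) (y + dd.2) = true := by
              simp only [hitQ, List.any_eq_true]
              exact ⟨(x, y), hxQ, by
                simp only [hitB, List.any_eq_true]
                exact ⟨dd, hdd, by rw [Bool.and_eq_true, beq_iff_eq, beq_iff_eq]; exact ⟨rfl, rfl⟩⟩⟩
            have hok : okB N cls (x + dd.1) (y + dd.2) = true :=
              (okB_true N cls _ _).mpr ⟨hnin, hn4⟩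
            rw [hhit, hok]
            simp
          · -- old invariant plus monotonicity
            exact sweep_mono N cls Q V _ _ hnin.1 hnin.2.2.1
              (hInv x y hxy hxV hxQ dd hdd hnin hn4)
        · -- (x,y) was newly marked, so it is in the new queue: contradiction
          exfalso
          have hxV' : vGetA V x y = false := by
            revert hxV; cases vGetA V x y <;> simp
          exact hxq (sweep_r N cls Q V x y hxy.1 hxy.2.2.1 hxV' hxt)
      have hrec := ih (sweepA N cls Q V).1 (sweepA N cls Q V).2 hshape' (days + 1)
        hm' hq' hQ'in hQ'V hInv'
      rw [hrec]
      have : loopB N cls (sweepA N cls Q V).2 hshape' (days + 1 + 1)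
          = loopB N cls (stepCA N cls V) (shape_stepCA N cls V) (days + 1 + 1) := by
        congr 1
      rw [this]

theorem innerGrid_getElem? (cls : List (List Int)) (i : Nat) :
    ∀ (L : List Int) (V : List (List Bool)) (a : Nat),
    (L.foldl (fun V j => if cellA cls (i : Int) j = 1 then vSetA V (i : Int).toNat j.toNat else V) V)[a]?
      = if a = i then (V[a]?).map
          (fun r => L.foldl (fun r j => if cellA cls (i : Int) j = 1 then setRowA r j.toNat else r) r)
        else V[a]? := by
  intro L
  induction L with
  | nil =>
    intro V a
    by_cases ha : a = i <;> simp [ha]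
  | cons j t ih =>
    intro V a
    simp only [List.foldl_cons]
    by_cases hc : cellA cls (i : Int) j = 1
    · rw [if_pos hc, ih]
      by_cases ha : a = i
      · subst ha
        simp [vSetA_getElem?, Option.map_map, hc]
        rfl
      · simp [ha, vSetA_getElem?]
    · rw [if_neg hc, ih]
      by_cases ha : a = i
      · subst ha
        simp [hc]
      · simp [ha]

theorem outerGrid_getElem? (cls : List (List Int)) (L : List Int) :
    ∀ (M : List Nat), M.Nodup → ∀ (V : List (List Bool)) (a : Nat),
    ((M.map (fun k : Nat => (k : Int))).foldl
        (fun V i => L.foldl (fun V j => if cellA cls i j = 1 then vSetA V i.toNat j.toNat else V) V)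
        V)[a]?
      = if a ∈ M then (V[a]?).map
          (fun r => L.foldl (fun r j => if cellA cls (a : Int) j = 1 then setRowA r j.toNat else r) r)
        else V[a]? := by
  intro M
  induction M with
  | nil => intro _ V a; simp
  | cons k M' ih =>
    intro hM V a
    have hk : k ∉ M' := (List.nodup_cons.mp hM).1
    have hM' : M'.Nodup := (List.nodup_cons.mp hM).2
    simp only [List.map_cons, List.foldl_cons]
    rw [ih hM']
    by_cases ha : a ∈ M'
    · have hak : a ≠ k := fun h => hk (h ▸ ha)
      rw [if_pos ha, if_pos (List.mem_cons.mpr (Or.inr ha)), innerGrid_getElem?, if_neg hak]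
    · by_cases hak : a = k
      · subst hak
        rw [if_neg ha, if_pos (List.mem_cons_self), innerGrid_getElem?, if_pos rfl]
      · rw [if_neg ha, if_neg (by simp [hak, ha]), innerGrid_getElem?, if_neg hak]

theorem rowFold_getElem? (cls : List (List Int)) (a : Nat) :
    ∀ (M : List Nat), M.Nodup → ∀ (r : List Bool) (b : Nat),
    ((M.map (fun k : Nat => (k : Int))).foldl
        (fun r j => if cellA cls (a : Int) j = 1 then setRowA r j.toNat else r) r)[b]?
      = if b ∈ M ∧ cellA cls (a : Int) (b : Int) = 1 then (r[b]?).map (fun _ => true) else r[b]? := by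
  intro M
  induction M with
  | nil => intro _ r b; simp
  | cons k M' ih =>
    intro hM r b
    have hk : k ∉ M' := (List.nodup_cons.mp hM).1
    have hM' : M'.Nodup := (List.nodup_cons.mp hM).2
    simp only [List.map_cons, List.foldl_cons]
    rw [ih hM']
    by_cases hc : cellA cls (a : Int) (k : Int) = 1
    · rw [if_pos hc]
      by_cases hb : b ∈ M' ∧ cellA cls (a : Int) (b : Int) = 1
      · have hbk : b ≠ k := fun h => hk (h ▸ hb.1)
        rw [if_pos hb, if_pos ⟨List.mem_cons.mpr (Or.inr hb.1), hb.2⟩, Int.toNat_natCast,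
          setRowA_getElem?, if_neg hbk]
      · rw [if_neg hb, Int.toNat_natCast, setRowA_getElem?]
        by_cases hbk : b = k
        · subst hbk
          rw [if_pos rfl, if_pos ⟨List.mem_cons_self, hc⟩]
        · rw [if_neg hbk, if_neg (by simp only [List.mem_cons]; tauto)]
    · rw [if_neg hc]
      by_cases hb : b ∈ M' ∧ cellA cls (a : Int) (b : Int) = 1
      · rw [if_pos hb, if_pos ⟨List.mem_cons.mpr (Or.inr hb.1), hb.2⟩]
      · rw [if_neg hb, if_neg ?_]
        simp only [List.mem_cons]
        rintro ⟨hb1 | hb2, hbc⟩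
        · exact hc (hb1 ▸ hbc)
        · exact hb ⟨hb2, hbc⟩

theorem grid_eq (N : Int) (cls : List (List Int)) :
    (PySem.List.pyRange 0 N 1).foldl
        (fun V i => (PySem.List.pyRange 0 N 1).foldl
          (fun V j => if cellA cls i j = 1 then vSetA V i.toNat j.toNat else V) V)
        (List.replicate N.toNat (List.replicate N.toNat false))
      = (PySem.List.pyRange 0 N 1).map (fun i =>
          (PySem.List.pyRange 0 N 1).map (fun j => cellA cls i j == 1)) := by
  simp only [pyRange_cast]
  apply List.ext_getElem?
  intro a
  rw [outerGrid_getElem? cls _ (List.range N.toNat) List.nodup_range]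
  rw [List.map_map, List.getElem?_map]
  by_cases ha : a < N.toNat
  · rw [if_pos (List.mem_range.mpr ha), List.getElem?_range ha,
      List.getElem?_replicate, if_pos ha]
    simp only [Option.map_some, Function.comp_apply]
    congr 1
    rw [List.map_map]
    apply List.ext_getElem?
    intro b
    rw [rowFold_getElem? cls a (List.range N.toNat) List.nodup_range, List.getElem?_map]
    by_cases hb : b < N.toNat
    · rw [List.getElem?_range hb, List.getElem?_replicate, if_pos hb]
      by_cases hcc : cellA cls (a : Int) (b : Int) = 1
      · rw [if_pos ⟨List.mem_range.mpr hb, hcc⟩]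
        simp [hcc]
      · rw [if_neg (fun h => hcc h.2)]
        simp [hcc]
    · rw [if_neg (fun h => hb (List.mem_range.mp h.1))]
      rw [List.getElem?_eq_none (by simpa using hb),
        List.getElem?_eq_none (by simpa using hb)]
      rfl
  · rw [if_neg (fun h => ha (List.mem_range.mp h)), List.getElem?_replicate, if_neg ha,
      List.getElem?_eq_none (by simpa using ha)]
    rfl

theorem inner_split (cls : List (List Int)) (i : Int) :
    ∀ (M : List Int) (acc : List (Int × Int)) (V : List (List Bool)),
    M.foldl (fun st j => if cellA cls i j = 1 then (st.1 ++ [(i, j)], vSetA st.2 i.toNat j.toNat)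
        else st) (acc, V)
      = (acc ++ (M.filter (fun j => cellA cls i j == 1)).map (fun j => (i, j)),
         M.foldl (fun V j => if cellA cls i j = 1 then vSetA V i.toNat j.toNat else V) V) := by
  intro M
  induction M with
  | nil => intro acc V; simp
  | cons j t ih =>
    intro acc V
    simp only [List.foldl_cons, List.filter_cons]
    by_cases hc : cellA cls i j = 1
    · simp only [hc, beq_self_eq_true, ih]
      simp
    · simp only [if_neg hc, ih]
      have : ((cellA cls i j == 1) : Bool) = false := by simp [hc]
      simp [this]

theorem outer_split (cls : List (List Int)) :
    ∀ (K M : List Int) (acc : List (Int × Int)) (V : List (List Bool)),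
    K.foldl (fun st i => M.foldl (fun st j =>
        if cellA cls i j = 1 then (st.1 ++ [(i, j)], vSetA st.2 i.toNat j.toNat) else st) st)
      (acc, V)
      = (acc ++ K.flatMap (fun i => (M.filter (fun j => cellA cls i j == 1)).map (fun j => (i, j))),
         K.foldl (fun V i => M.foldl (fun V j =>
           if cellA cls i j = 1 then vSetA V i.toNat j.toNat else V) V) V) := by
  intro K M
  induction K with
  | nil => intro acc V; simp
  | cons i t ih =>
    intro acc V
    simp only [List.foldl_cons, List.flatMap_cons]
    rw [inner_split, ih]
    simp [List.append_assoc]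

-- the seed list and the initial grid
def seedsF (N : Int) (cls : List (List Int)) : List (Int × Int) :=
  (PySem.List.pyRange 0 N 1).flatMap (fun i =>
    ((PySem.List.pyRange 0 N 1).filter (fun j => cellA cls i j == 1)).map (fun j => (i, j)))

theorem mem_seedsF (N : Int) (cls : List (List Int)) (p : Int × Int) :
    p ∈ seedsF N cls ↔ (0 ≤ p.1 ∧ p.1 < N ∧ 0 ≤ p.2 ∧ p.2 < N ∧ cellA cls p.1 p.2 = 1) := by
  obtain ⟨a, b⟩ := p
  unfold seedsF
  simp only [List.mem_flatMap, List.mem_map, List.mem_filter, PySem.List.mem_pyRange_one]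
  constructor
  · rintro ⟨i, hi, j, ⟨hj, hc⟩, heq⟩
    cases heq
    exact ⟨hi.1, hi.2, hj.1, hj.2, by simpa using hc⟩
  · rintro ⟨h1, h2, h3, h4, h5⟩
    exact ⟨a, ⟨h1, h2⟩, b, ⟨⟨h3, h4⟩, by simp [h5]⟩, rfl⟩

theorem vGet_init (N : Int) (cls : List (List Int)) (a b : Int) (h : inR N a b) :
    vGetA (initGrid N cls) a b = (cellA cls a b == 1) := by
  obtain ⟨ha, haN, hb, hbN⟩ := h
  unfold vGetA initGrid
  rw [PySem.List.pyGet?_of_nonneg _ ha, pyRange_cast]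
  simp only [List.map_map]
  have hlt : a.toNat < N.toNat := by omega
  rw [List.getElem?_map, List.getElem?_range hlt]
  simp only [Option.map_some, Function.comp_apply, Option.getD_some]
  rw [PySem.List.pyGet?_of_nonneg _ hb]
  have hltb : b.toNat < N.toNat := by omega
  rw [List.getElem?_map, List.getElem?_range hltb]
  simp only [Option.map_some, Function.comp_apply, Option.getD_some]
  rw [Int.toNat_of_nonneg ha, Int.toNat_of_nonneg hb]
  rfl

theorem any_init_iff (N : Int) (cls : List (List Int)) :
    ((initGrid N cls).any (fun r => r.any (fun c => c))) = true ↔ seedsF N cls ≠ [] := by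
  constructor
  · intro h
    simp only [initGrid, List.any_eq_true, List.mem_map] at h
    obtain ⟨r, ⟨i, hi, rfl⟩, x, hx, hxt⟩ := h
    obtain ⟨j, hj, rfl⟩ := List.mem_map.mp hx
    intro hnil
    have : (i, j) ∈ seedsF N cls := by
      rw [mem_seedsF]
      rw [PySem.List.mem_pyRange_one] at hi hj
      refine ⟨hi.1, hi.2, hj.1, hj.2, ?_⟩
      rw [cellB_eq] at hxt
      exact beq_iff_eq.mp hxt
    rw [hnil] at this
    simp at this
  · intro h
    obtain ⟨p, hp⟩ := List.exists_mem_of_ne_nil _ h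
    rw [mem_seedsF] at hp
    simp only [initGrid, List.any_eq_true, List.mem_map]
    refine ⟨(PySem.List.pyRange 0 N 1).map (fun j => cellB cls p.1 j == 1),
      ⟨p.1, by rw [PySem.List.mem_pyRange_one]; exact ⟨hp.1, hp.2.1⟩, rfl⟩,
      (cellB cls p.1 p.2 == 1), ?_, ?_⟩
    · exact List.mem_map.mpr ⟨p.2,
        by rw [PySem.List.mem_pyRange_one]; exact ⟨hp.2.2.1, hp.2.2.2.1⟩, rfl⟩
    · rw [cellB_eq]
      simp [hp.2.2.2.2]

theorem main_equiv (N : Int) (classroom : List (List Int)) :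
    corona N classroom = corona_alt N classroom := by
  simp only [corona, corona_alt]
  rw [outer_split]
  simp only [List.nil_append]
  have hVinit : (PySem.List.pyRange 0 N 1).foldl (fun V i => (PySem.List.pyRange 0 N 1).foldl
      (fun V j => if cellA classroom i j = 1 then vSetA V i.toNat j.toNat else V) V)
      (List.replicate N.toNat (List.replicate N.toNat false)) = initGrid N classroom := by
    rw [grid_eq]
    rfl
  rw [hVinit]
  show loopA N classroom (seedsF N classroom) (initGrid N classroom) 0 = _
  by_cases hs : seedsF N classroom = []
  · have hany : ((initGrid N classroom).any (fun r => r.any (fun c => c))) = false := by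
      cases h : ((initGrid N classroom).any (fun r => r.any (fun c => c)))
      · rfl
      · exact absurd ((any_init_iff N classroom).mp h) (by simp [hs])
    rw [hs, loopA_unfold]
    simp [hany]
  · have hany : ((initGrid N classroom).any (fun r => r.any (fun c => c))) = true :=
      (any_init_iff N classroom).mpr hs
    rw [hany]
    have hQin : ∀ c ∈ seedsF N classroom, inR N c.1 c.2 := by
      intro c hc
      rw [mem_seedsF] at hc
      exact ⟨hc.1, hc.2.1, hc.2.2.1, hc.2.2.2.1⟩
    have hQV : ∀ c ∈ seedsF N classroom, vGetA (initGrid N classroom) c.1 c.2 = true := by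
      intro c hc
      rw [mem_seedsF] at hc
      rw [vGet_init N classroom c.1 c.2 ⟨hc.1, hc.2.1, hc.2.2.1, hc.2.2.2.1⟩]
      simp [hc.2.2.2.2]
    have hInv : InvA N classroom (initGrid N classroom) (seedsF N classroom) := by
      intro x y hxy hxt hxq dd hdd hnin hn4
      exfalso
      apply hxq
      rw [mem_seedsF]
      rw [vGet_init N classroom x y hxy] at hxt
      exact ⟨hxy.1, hxy.2.1, hxy.2.2.1, hxy.2.2.2, beq_iff_eq.mp hxt⟩
    rw [loop_sim N classroom (List.length (seedsF N classroom) + unvisG (initGrid N classroom))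
      (seedsF N classroom) (initGrid N classroom) (shape_init N classroom) 0 (le_refl _) hs
      hQin hQV hInv]
    simp

-- ===== VERDICT (by name: the statement is the Claim_ definition above) =====
theorem corona_spec : Claim_equal_corona := by
  intro N classroom _ _
  unfold Spec_corona
  exact main_equiv N classroom
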